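-- pv_equiv track=rewrite | github.com/yimadaOrz/bigdata | BDM_final/FinalC.py | formatprocessing
-- ===== SOURCE A (Python) =====
-- def formatprocessing(records):
--     for r in records:
--         if r[0][1]==2015:
--             yield (r[0][0], (r[1], 0, 0, 0, 0))
--         elif r[0][1]==2016:
--             yield (r[0][0], (0, r[1], 0, 0, 0))
--         elif r[0][1]==2017:
--             yield (r[0][0], (0, 0, r[1], 0, 0))
--         elif r[0][1]==2018:
--             yield (r[0][0], (0, 0, 0, r[1], 0))
--         elif r[0][1]==2019:
--             yield (r[0][0], (0, 0, 0, 0, r[1]))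
--         else:
--             yield (r[0][0], (0, 0, 0, 0, 0))
-- ===== SOURCE B (Python) =====
-- YEARS = (2015, 2016, 2017, 2018, 2019)
--
-- def formatprocessing(records):
--     recs = list(records)
--     keys = [r[0][0] for r in recs]
--     cols = [[r[1] if r[0][1] == y else 0 for r in recs] for y in YEARS]
--     for key, tup in zip(keys, zip(*cols)):
--         yield (key, tup)
-- ===== Notes on version B (the rewrite author's own statement) =====
-- stated objective: alternative
-- what changed: Replaces A's single pass with a five-way if/elif per record by a columnar decomposition: one pass per year builds that year's column, then the key column is zipped with the transposed columns.
import Mathlib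
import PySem

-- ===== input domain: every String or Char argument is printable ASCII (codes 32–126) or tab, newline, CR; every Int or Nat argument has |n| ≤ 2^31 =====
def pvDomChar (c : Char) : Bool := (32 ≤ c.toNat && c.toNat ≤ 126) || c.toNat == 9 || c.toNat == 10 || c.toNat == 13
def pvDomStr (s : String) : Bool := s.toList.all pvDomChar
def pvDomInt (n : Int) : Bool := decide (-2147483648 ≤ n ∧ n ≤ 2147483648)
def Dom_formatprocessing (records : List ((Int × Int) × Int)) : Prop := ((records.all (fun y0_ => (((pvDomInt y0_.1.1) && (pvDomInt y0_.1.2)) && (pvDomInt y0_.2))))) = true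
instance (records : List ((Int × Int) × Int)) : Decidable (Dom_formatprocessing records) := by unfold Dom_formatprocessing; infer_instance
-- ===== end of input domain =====

-- B replaces A's per-record five-way branch by a columnar decomposition: one pass per year
-- building that year's column, then the key column is zipped with the transposed columns
-- (objective: alternative; equivalence is about the yielded values).

-- ===== PORT A =====
def formatprocessing (records : List ((Int × Int) × Int)) : List (Int × (Int × Int × Int × Int × Int)) :=
  records.map (fun r =>
    if r.1.2 == 2015 then (r.1.1, (r.2, 0, 0, 0, 0))
    else if r.1.2 == 2016 then (r.1.1, (0, r.2, 0, 0, 0))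
    else if r.1.2 == 2017 then (r.1.1, (0, 0, r.2, 0, 0))
    else if r.1.2 == 2018 then (r.1.1, (0, 0, 0, r.2, 0))
    else if r.1.2 == 2019 then (r.1.1, (0, 0, 0, 0, r.2))
    else (r.1.1, (0, 0, 0, 0, 0)))

-- ===== PORT B =====
-- one year's column: [r[1] if r[0][1] == y else 0 for r in recs]
def pvCol (y : Int) (recs : List ((Int × Int) × Int)) : List Int :=
  recs.map (fun r => if r.1.2 == y then r.2 else 0)

-- zip(*cols) for the five columns (stops at the shortest, like Python's zip)
def pvZip5 : List Int → List Int → List Int → List Int → List Int → List (Int × Int × Int × Int × Int)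
  | a :: as, b :: bs, c :: cs, d :: ds, e :: es => (a, b, c, d, e) :: pvZip5 as bs cs ds es
  | _, _, _, _, _ => []

def formatprocessing_alt (records : List ((Int × Int) × Int)) : List (Int × (Int × Int × Int × Int × Int)) :=
  let keys := records.map (fun r => r.1.1)
  List.zipWith (fun k t => (k, t)) keys
    (pvZip5 (pvCol 2015 records) (pvCol 2016 records) (pvCol 2017 records)
            (pvCol 2018 records) (pvCol 2019 records))

-- ===== PRECONDITION & SPEC =====
def Spec_formatprocessing (records : List ((Int × Int) × Int)) (out : List (Int × (Int × Int × Int × Int × Int))) : Prop := out = formatprocessing_alt records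
instance (records : List ((Int × Int) × Int)) (out : List (Int × (Int × Int × Int × Int × Int))) : Decidable (Spec_formatprocessing records out) := by unfold Spec_formatprocessing; infer_instance

-- ===== CLAIM (what is proved, stated in full; the proofs are below) =====
def Claim_equal_formatprocessing : Prop := ∀ (records : List ((Int × Int) × Int)), Dom_formatprocessing records → Spec_formatprocessing records (formatprocessing records)

-- ===== LEMMAS AND PROOFS =====
theorem formatprocessing_eq (records : List ((Int × Int) × Int)) :
    formatprocessing records = formatprocessing_alt records := by
  induction records with
  | nil => rfl
  | cons r rs ih =>
    simp only [formatprocessing, formatprocessing_alt, pvCol, List.map_cons, pvZip5,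
      List.zipWith_cons_cons, List.cons.injEq] at ih ⊢
    refine ⟨?_, ih⟩
    by_cases h15 : r.1.2 = 2015
    · simp [h15]
    · by_cases h16 : r.1.2 = 2016
      · simp [h16]
      · by_cases h17 : r.1.2 = 2017
        · simp [h17]
        · by_cases h18 : r.1.2 = 2018
          · simp [h18]
          · by_cases h19 : r.1.2 = 2019
            · simp [h19]
            · simp [h15, h16, h17, h18, h19]

-- ===== VERDICT (by name: the statement is the Claim_ definition above) =====
theorem formatprocessing_spec : Claim_equal_formatprocessing :=
  fun records _ => formatprocessing_eq records
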